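-- pv_equiv track=rewrite | github.com/JackStar2/Bai-Tap | List.py | find_decreasing_subsequences
-- ===== SOURCE A (Python) =====
-- def find_decreasing_subsequences(lst):
--     subsequences = []
--     current_subsequence = [lst[0]]
--
--     for i in range(1, len(lst)):
--         if lst[i] < lst[i - 1]:
--             current_subsequence.append(lst[i])
--         else:
--             if len(current_subsequence) > 1:
--                 subsequences.append(current_subsequence)
--             current_subsequence = [lst[i]]
--
--     if len(current_subsequence) > 1:
--         subsequences.append(current_subsequence)
--
--     return subsequences
-- ===== SOURCE B (Python) =====
-- def find_decreasing_subsequences(lst):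
--     # Pass 1: cut points where a new run starts.
--     cuts = [0]
--     for i in range(1, len(lst)):
--         if lst[i] >= lst[i - 1]:
--             cuts.append(i)
--     cuts.append(len(lst))
--     # Pass 2: slice out each run, keep the ones longer than 1.
--     result = []
--     for a, b in zip(cuts, cuts[1:]):
--         if b - a > 1:
--             result.append(lst[a:b])
--     return result
-- ===== Notes on version B (the rewrite author's own statement) =====
-- stated objective: alternative
-- what changed: Instead of growing the current run incrementally and appending it on each break, B first computes the list of cut indices where a run starts in one pass, then slices the input at consecutive cut pairs and keeps slices of length > 1.
import Mathlib
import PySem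

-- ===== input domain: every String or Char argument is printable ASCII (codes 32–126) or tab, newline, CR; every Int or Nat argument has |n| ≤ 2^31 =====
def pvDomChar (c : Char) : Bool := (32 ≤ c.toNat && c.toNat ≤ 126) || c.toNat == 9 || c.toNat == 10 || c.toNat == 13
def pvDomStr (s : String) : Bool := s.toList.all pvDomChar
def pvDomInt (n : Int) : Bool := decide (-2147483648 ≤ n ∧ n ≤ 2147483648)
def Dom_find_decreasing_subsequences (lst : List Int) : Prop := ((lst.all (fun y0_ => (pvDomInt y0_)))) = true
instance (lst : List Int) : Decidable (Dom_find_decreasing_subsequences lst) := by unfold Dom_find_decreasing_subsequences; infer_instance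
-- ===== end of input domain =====

-- B finds the runs by a cut-point table plus slicing instead of A's incremental appends (alternative decomposition, same cost).
-- ===== PORT A =====
-- loop body of A's for-loop (state = (subsequences, current_subsequence))
def pvStepA (lst : List Int) (st : List (List Int) × List Int) (i : Int) :
    List (List Int) × List Int :=
  if PySem.List.pyGetD lst i 0 < PySem.List.pyGetD lst (i - 1) 0 then
    (st.1, st.2 ++ [PySem.List.pyGetD lst i 0])
  else
    ((if st.2.length > 1 then st.1 ++ [st.2] else st.1), [PySem.List.pyGetD lst i 0])

def find_decreasing_subsequences (lst : List Int) : List (List Int) :=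
  match PySem.List.pyGet? lst 0 with
  | none => []  -- Python raises IndexError here; excluded by Pre_
  | some x0 =>
    let st := (PySem.List.pyRange 1 (lst.length : Int)).foldl (pvStepA lst) ([], [x0])
    if st.2.length > 1 then st.1 ++ [st.2] else st.1

-- ===== PORT B =====
-- pass 1 body: record i as a cut when lst[i] >= lst[i-1]
def pvCutStep (lst : List Int) (cs : List Int) (i : Int) : List Int :=
  if PySem.List.pyGetD lst (i - 1) 0 ≤ PySem.List.pyGetD lst i 0 then cs ++ [i] else cs

-- pass 2 body: keep the slice at a cut pair when it is longer than 1
def pvCollectStep (lst : List Int) (res : List (List Int)) (p : Int × Int) :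
    List (List Int) :=
  if p.2 - p.1 > 1 then res ++ [PySem.List.slice lst (some p.1) (some p.2)] else res

def find_decreasing_subsequences_alt (lst : List Int) : List (List Int) :=
  let cuts := (PySem.List.pyRange 1 (lst.length : Int)).foldl (pvCutStep lst) [0]
  let cuts2 := cuts ++ [(lst.length : Int)]
  (cuts2.zip cuts2.tail).foldl (pvCollectStep lst) []

-- ===== PRECONDITION & SPEC =====
-- A reads lst[0] unconditionally, so it raises IndexError on the empty list.
def Pre_find_decreasing_subsequences (lst : List Int) : Prop := lst ≠ []
instance (lst : List Int) : Decidable (Pre_find_decreasing_subsequences lst) := by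
  unfold Pre_find_decreasing_subsequences; infer_instance

def pvWitness_find_decreasing_subsequences : List Int := [5, 3, 2, 4, 1]

def Spec_find_decreasing_subsequences (lst : List Int) (out : List (List Int)) : Prop :=
  out = find_decreasing_subsequences_alt lst
instance (lst : List Int) (out : List (List Int)) :
    Decidable (Spec_find_decreasing_subsequences lst out) := by
  unfold Spec_find_decreasing_subsequences; infer_instance

-- ===== CLAIM (what is proved, stated in full; the proofs are below) =====
def Claim_equal_find_decreasing_subsequences : Prop :=
  ∀ (lst : List Int), Dom_find_decreasing_subsequences lst →
    Pre_find_decreasing_subsequences lst →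
    Spec_find_decreasing_subsequences lst (find_decreasing_subsequences lst)

-- ===== LEMMAS AND PROOFS =====

-- consecutive pairs of a list: appending one more element adds one pair ending at it
lemma pv_zip_tail_cons {α : Type} (x : α) (t : List α) (h : t ≠ []) :
    (x :: t).zip (x :: t).tail = (x, t.head h) :: t.zip t.tail := by
  cases t with
  | nil => exact absurd rfl h
  | cons y t' => simp [List.zip]

lemma pv_head_append_cons {α : Type} (l : List α) (a : α) (m : List α) (h : l ++ a :: m ≠ []) :
    (l ++ a :: m).head h = (l ++ [a]).head (by simp) := by
  cases l with
  | nil => simp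
  | cons z l' => simp

lemma pv_pairs_append {α : Type} (l : List α) (a b : α) :
    (l ++ [a, b]).zip (l ++ [a, b]).tail
      = (l ++ [a]).zip (l ++ [a]).tail ++ [(a, b)] := by
  induction l with
  | nil => simp [List.zip]
  | cons x l ih =>
    have h1 : l ++ [a, b] ≠ [] := by simp
    have h2 : l ++ [a] ≠ [] := by simp
    rw [List.cons_append, pv_zip_tail_cons x (l ++ [a, b]) h1,
        List.cons_append, pv_zip_tail_cons x (l ++ [a]) h2, ih]
    have : (l ++ [a, b]).head h1 = (l ++ [a]).head h2 := by
      simpa using pv_head_append_cons l a [b] h1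
    rw [this]
    simp

lemma pv_collect_snoc (lst : List Int) (l : List Int) (a b : Int) :
    ((l ++ [a, b]).zip (l ++ [a, b]).tail).foldl (pvCollectStep lst) []
      = pvCollectStep lst (((l ++ [a]).zip (l ++ [a]).tail).foldl (pvCollectStep lst) []) (a, b) := by
  rw [pv_pairs_append, List.foldl_append]
  simp

-- extending the current run by one element = widening its slice by one
lemma pv_slice_snoc (lst : List Int) (c k : Nat) (_hck : c ≤ k) (hk : k < lst.length) :
    PySem.List.slice lst (some (c : Int)) (some (k : Int)) ++ [lst.getD k 0]
      = PySem.List.slice lst (some (c : Int)) (some ((k + 1 : Nat) : Int)) := by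
  rw [PySem.List.slice_natCast, PySem.List.slice_natCast]
  have h1 : k + 1 - c = (k - c) + 1 := by omega
  rw [h1, List.take_add_one]
  have h2 : (lst.drop c)[k - c]? = lst[k]? := by
    rw [List.getElem?_drop]
    congr 1
    omega
  rw [h2, List.getElem?_eq_getElem hk]
  simp [List.getD, List.getElem?_eq_getElem hk]

lemma pv_slice_single (lst : List Int) (k : Nat) (hk : k < lst.length) :
    PySem.List.slice lst (some (k : Int)) (some ((k + 1 : Nat) : Int)) = [lst.getD k 0] := by
  rw [PySem.List.slice_natCast]
  have h1 : k + 1 - k = 1 := by omega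
  rw [h1, List.drop_eq_getElem_cons hk, List.getD_eq_getElem lst 0 hk]
  rfl

lemma pv_slice_length (lst : List Int) (c k : Nat) (_hck : c ≤ k) (hk : k ≤ lst.length) :
    (PySem.List.slice lst (some (c : Int)) (some (k : Int))).length = k - c := by
  rw [PySem.List.slice_natCast]
  simp
  omega

-- the loop invariant linking A's (subsequences, current) to B's cut list
lemma pv_invariant (lst : List Int) (x : Int) (hx : lst.head? = some x)
    (k : Nat) (hk1 : 1 ≤ k) (hkn : k ≤ lst.length) :
    ∃ (cs : List Int) (c : Nat), c < k ∧
      (PySem.List.pyRange 1 (k : Int)).foldl (pvCutStep lst) [0] = cs ++ [(c : Int)] ∧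
      ((PySem.List.pyRange 1 (k : Int)).foldl (pvStepA lst) ([], [x])).2
        = PySem.List.slice lst (some (c : Int)) (some (k : Int)) ∧
      ((PySem.List.pyRange 1 (k : Int)).foldl (pvStepA lst) ([], [x])).1
        = ((cs ++ [(c : Int)]).zip (cs ++ [(c : Int)]).tail).foldl (pvCollectStep lst) [] := by
  induction k with
  | zero => omega
  | succ k ih =>
    by_cases hk0 : k = 0
    · -- base case k+1 = 1 : the loop has not run
      subst hk0
      refine ⟨[], 0, by omega, ?_, ?_, ?_⟩
      · norm_num [PySem.List.pyRange]
      · have : lst ≠ [] := by cases lst <;> simp_all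
        obtain ⟨y, t, hyt⟩ := List.exists_cons_of_ne_nil this
        subst hyt
        simp at hx
        subst hx
        norm_num [PySem.List.pyRange]
        have hs : PySem.List.slice (y :: t) none (some (1 : Int))
            = (y :: t).take ((1 : Int)).toNat :=
          PySem.List.slice_to (y :: t) (by norm_num : (0 : Int) ≤ 1)
        rw [hs]
        simp
      · norm_num [PySem.List.pyRange, List.zip]
    · -- inductive step : run the loop body at index k
      have hk1' : 1 ≤ k := by omega
      have hkn' : k < lst.length := by omega
      obtain ⟨cs, c, hc, hcut, hcur, hsubs⟩ := ih hk1' (by omega)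
      have hrange : PySem.List.pyRange 1 ((k + 1 : Nat) : Int)
          = PySem.List.pyRange 1 (k : Int) ++ [(k : Int)] := by
        rw [show ((k + 1 : Nat) : Int) = (k : Int) + 1 by push_cast; ring]
        exact PySem.List.pyRange_one_succ_right (by exact_mod_cast hk1')
      have hidx : ((k : Int) - 1) = ((k - 1 : Nat) : Int) := by omega
      have hgk : PySem.List.pyGetD lst (k : Int) 0 = lst.getD k 0 :=
        PySem.List.pyGetD_natCast lst k 0
      have hgk1 : PySem.List.pyGetD lst ((k : Int) - 1) 0 = lst.getD (k - 1) 0 := by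
        rw [hidx]; exact PySem.List.pyGetD_natCast lst (k - 1) 0
      rw [hrange, List.foldl_append, List.foldl_append]
      simp only [List.foldl_cons, List.foldl_nil]
      generalize hst : (PySem.List.pyRange 1 (k : Int)).foldl (pvStepA lst) ([], [x]) = st
        at hcur hsubs ⊢
      by_cases hlt : lst.getD k 0 < lst.getD (k - 1) 0
      · -- strictly decreasing : extend the current run, no new cut
        refine ⟨cs, c, by omega, ?_, ?_, ?_⟩
        · rw [hcut]; unfold pvCutStep; rw [hgk, hgk1, if_neg (by omega)]
        · unfold pvStepA; rw [hgk, hgk1, if_pos hlt]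
          simp only
          rw [hcur, pv_slice_snoc lst c k (by omega) hkn']
        · unfold pvStepA; rw [hgk, hgk1, if_pos hlt]
          exact hsubs
      · -- run breaks : close the current run, start a new cut at k
        refine ⟨cs ++ [(c : Int)], k, by omega, ?_, ?_, ?_⟩
        · rw [hcut]; unfold pvCutStep; rw [hgk, hgk1, if_pos (by omega)]
        · unfold pvStepA; rw [hgk, hgk1, if_neg (by omega)]
          simp only
          exact (pv_slice_single lst k hkn').symm
        · unfold pvStepA; rw [hgk, hgk1, if_neg (by omega)]
          simp only
          have hlen : st.2.length = k - c := by
            rw [hcur]; exact pv_slice_length lst c k (by omega) (by omega)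
          rw [show cs ++ [(c : Int)] ++ [(k : Int)] = cs ++ [(c : Int), (k : Int)] by simp]
          rw [pv_collect_snoc lst cs (c : Int) (k : Int), ← hsubs]
          simp only [pvCollectStep]
          rw [← hcur, hlen]
          by_cases hbig : k - c > 1
          · rw [if_pos hbig, if_pos (by omega)]
          · rw [if_neg hbig, if_neg (by omega)]

-- ===== VERDICT (by name: the statement is the Claim_ definition above) =====
theorem find_decreasing_subsequences_spec : Claim_equal_find_decreasing_subsequences := by
  intro lst _ hpre
  unfold Spec_find_decreasing_subsequences
  obtain ⟨x, t, rfl⟩ := List.exists_cons_of_ne_nil hpre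
  obtain ⟨cs, c, hc, hcut, hcur, hsubs⟩ :=
    pv_invariant (x :: t) x rfl (x :: t).length (by simp) (le_refl _)
  unfold find_decreasing_subsequences find_decreasing_subsequences_alt
  rw [show PySem.List.pyGet? (x :: t) 0 = some x from by
        rw [show (0 : Int) = ((0 : Nat) : Int) by norm_num, PySem.List.pyGet?_natCast]; rfl]
  simp only
  rw [hcut, hcur, hsubs]
  rw [show cs ++ [(c : Int)] ++ [((x :: t).length : Int)]
        = cs ++ [(c : Int), ((x :: t).length : Int)] by simp]
  rw [pv_collect_snoc (x :: t) cs (c : Int) ((x :: t).length : Int)]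
  unfold pvCollectStep
  simp only
  have hlen : (PySem.List.slice (x :: t) (some (c : Int)) (some ((x :: t).length : Int))).length
      = (x :: t).length - c :=
    pv_slice_length (x :: t) c (x :: t).length (by omega) (le_refl _)
  rw [hlen]
  by_cases hbig : (x :: t).length - c > 1
  · rw [if_pos hbig, if_pos (by omega)]
  · rw [if_neg hbig, if_neg (by omega)]
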